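-- pv_equiv track=rewrite | github.com/gargishroff/NLP-Tasks | Neural Language Modeling/transformer.py | sentence_data
-- ===== SOURCE A (Python) =====
-- def sentence_data (sentence,word2idx):
--     max_sentence_length = 60
--     len_sent = 0
--     sentence_embeddings = []
--     sentence_indices = []
--     for word in sentence:
--         sentence_embeddings.append(word2idx.get(word, word2idx['<unk>']))
--         if len_sent + 1 < len(sentence):
--             sentence_indices.append(word2idx.get(sentence[len_sent + 1], word2idx['<unk>']))
--         else:
--             sentence_indices.append(word2idx.get('<pad>', word2idx['<unk>']))
--         len_sent += 1
--         if len_sent == max_sentence_length: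
--             break
--
--     while len_sent < max_sentence_length:
--         sentence_embeddings.append(word2idx['<pad>'])  # Padding embedding
--         sentence_indices.append(word2idx['<pad>'])  # Padding index
--         len_sent += 1
--
--     return sentence_embeddings,sentence_indices
-- ===== SOURCE B (Python) =====
-- def sentence_data(sentence, word2idx):
--     def lookup(w):
--         return word2idx.get(w, word2idx['<unk>'])
--     embeddings = [lookup(w) for w in sentence[:60]]
--     indices = [lookup(w) for w in sentence[1:61]]
--     if len(indices) < len(embeddings):
--         indices.append(lookup('<pad>'))
--     n_pad = 60 - len(embeddings)
--     if n_pad: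
--         p = word2idx['<pad>']
--         embeddings += [p] * n_pad
--         indices += [p] * n_pad
--     return embeddings, indices
-- ===== Notes on version B (the rewrite author's own statement) =====
-- stated objective: simpler
-- what changed: Replaces A's single interleaved loop (per-word branch on lookahead plus a separate while-loop for padding) by whole-sequence shaping: map the lookup over sentence[:60] and over the shifted slice sentence[1:61], append the one '<pad>' lookahead slot when the sentence fits, then extend both lists with a computed block of padding.
import Mathlib
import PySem

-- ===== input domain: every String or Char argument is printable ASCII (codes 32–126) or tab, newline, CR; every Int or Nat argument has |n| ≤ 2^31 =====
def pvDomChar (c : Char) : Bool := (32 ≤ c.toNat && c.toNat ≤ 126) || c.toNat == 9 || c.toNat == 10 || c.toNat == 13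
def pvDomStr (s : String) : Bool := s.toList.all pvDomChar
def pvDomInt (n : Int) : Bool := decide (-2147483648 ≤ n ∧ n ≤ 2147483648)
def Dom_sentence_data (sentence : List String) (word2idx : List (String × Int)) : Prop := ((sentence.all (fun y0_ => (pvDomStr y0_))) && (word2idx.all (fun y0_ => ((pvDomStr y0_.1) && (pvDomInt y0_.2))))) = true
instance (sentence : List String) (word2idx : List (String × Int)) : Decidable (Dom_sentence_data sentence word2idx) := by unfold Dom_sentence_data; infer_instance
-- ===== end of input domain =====

-- B replaces A's single interleaved per-word loop (lookahead branch + separate padding while-loop)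
-- by whole-sequence shaping: map the lookup over sentence[:60] and its shift sentence[1:61], append
-- the one '<pad>' lookahead slot when the sentence fits, then extend both with a padding block.
-- Objective: simpler.

-- shared dict primitive: word2idx.get(w) (first match in the association list)
def pvDget (d : List (String × Int)) (w : String) : Option Int :=
  PySem.Dict.get? (PySem.Dict.mk d) w

-- word2idx['<unk>'] / word2idx['<pad>']; under Pre_ the key is present, so the default 0 is never used
def pvUnk (d : List (String × Int)) : Int := (pvDget d "<unk>").getD 0
def pvPadv (d : List (String × Int)) : Int := (pvDget d "<pad>").getD 0

-- ===== PORT A =====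
-- the final while-loop of A: pad both lists up to 60
def pyA_pad (d : List (String × Int)) (k : Nat) (emb idx : List Int) : List Int × List Int :=
  if k < 60 then pyA_pad d (k + 1) (emb ++ [pvPadv d]) (idx ++ [pvPadv d]) else (emb, idx)
  termination_by 60 - k

-- the main for-loop of A: word = head of rest, len_sent = k, with break at 60
def pyA_loop (d : List (String × Int)) (s : List String) (rest : List String) (k : Nat)
    (emb idx : List Int) : List Int × List Int :=
  match rest with
  | [] => pyA_pad d k emb idx
  | w :: ws =>
    let emb' := emb ++ [(pvDget d w).getD (pvUnk d)]
    let idx' := idx ++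
      [if (k : Int) + 1 < (s.length : Int) then
          (pvDget d ((PySem.List.pyGet? s ((k : Int) + 1)).getD "")).getD (pvUnk d)
        else (pvDget d "<pad>").getD (pvUnk d)]
    if k + 1 = 60 then (emb', idx') else pyA_loop d s ws (k + 1) emb' idx'

def sentence_data (sentence : List String) (word2idx : List (String × Int)) : List Int × List Int :=
  pyA_loop word2idx sentence sentence 0 [] []

-- ===== PORT B =====
def sentence_data_alt (sentence : List String) (word2idx : List (String × Int)) : List Int × List Int :=
  let lookup := fun w => (pvDget word2idx w).getD (pvUnk word2idx)
  let emb := (PySem.List.slice sentence (some 0) (some 60)).map lookup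
  let idx0 := (PySem.List.slice sentence (some 1) (some 61)).map lookup
  let idx := if idx0.length < emb.length then idx0 ++ [lookup "<pad>"] else idx0
  let nPad := 60 - emb.length
  if nPad = 0 then (emb, idx)
  else (emb ++ List.replicate nPad (pvPadv word2idx), idx ++ List.replicate nPad (pvPadv word2idx))

-- ===== PRECONDITION & SPEC =====
-- Pre_ excludes exactly the inputs on which the Python A raises KeyError: '<unk>' is looked up
-- eagerly for every word processed, and '<pad>' is indexed directly whenever padding occurs
-- (i.e. whenever the sentence is shorter than 60). B raises on exactly the same inputs.
def Pre_sentence_data (sentence : List String) (word2idx : List (String × Int)) : Prop :=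
  (sentence ≠ [] → "<unk>" ∈ word2idx.map Prod.fst) ∧
  (sentence.length < 60 → "<pad>" ∈ word2idx.map Prod.fst)

instance (sentence : List String) (word2idx : List (String × Int)) : Decidable (Pre_sentence_data sentence word2idx) := by unfold Pre_sentence_data; infer_instance

def pvWitness_sentence_data : List String × (List (String × Int)) :=
  (["the", "cat"], [("the", 1), ("cat", 2), ("<unk>", 0), ("<pad>", 3)])

def Spec_sentence_data (sentence : List String) (word2idx : List (String × Int)) (out : List Int × List Int) : Prop := out = sentence_data_alt sentence word2idx
instance (sentence : List String) (word2idx : List (String × Int)) (out : List Int × List Int) : Decidable (Spec_sentence_data sentence word2idx out) := by unfold Spec_sentence_data; infer_instance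

-- ===== CLAIM (what is proved, stated in full; the proofs are below) =====
def Claim_equal_sentence_data : Prop := ∀ (sentence : List String) (word2idx : List (String × Int)), Dom_sentence_data sentence word2idx → Pre_sentence_data sentence word2idx → Spec_sentence_data sentence word2idx (sentence_data sentence word2idx)

-- ===== LEMMAS AND PROOFS =====

-- abbreviation for B's lookup, used only in the proofs
def pvLkp (d : List (String × Int)) (w : String) : Int := (pvDget d w).getD (pvUnk d)

-- functional characterisation of A's main loop on the remaining words with fuel = 60 - len_sent
def pvSpecGo (d : List (String × Int)) (rest : List String) (fuel : Nat) : List Int × List Int :=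
  match rest, fuel with
  | _, 0 => ([], [])
  | [], f => (List.replicate f (pvPadv d), List.replicate f (pvPadv d))
  | w :: ws, f + 1 =>
    let iv := match ws with | [] => pvLkp d "<pad>" | w2 :: _ => pvLkp d w2
    let r := pvSpecGo d ws f
    (pvLkp d w :: r.1, iv :: r.2)

theorem pvSpecGo_nil (d : List (String × Int)) (f : Nat) :
    pvSpecGo d [] f = (List.replicate f (pvPadv d), List.replicate f (pvPadv d)) := by
  cases f <;> simp [pvSpecGo]

theorem pyA_pad_spec (d : List (String × Int)) :
    ∀ (n k : Nat), 60 - k = n → ∀ (emb idx : List Int),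
      pyA_pad d k emb idx =
        (emb ++ List.replicate n (pvPadv d), idx ++ List.replicate n (pvPadv d)) := by
  intro n
  induction n with
  | zero =>
    intro k hk emb idx
    rw [pyA_pad]
    simp [show ¬ k < 60 by omega]
  | succ m ih =>
    intro k hk emb idx
    rw [pyA_pad]
    simp only [show k < 60 by omega, if_pos]
    rw [ih (k + 1) (by omega)]
    simp [List.replicate_succ]

theorem pyA_loop_spec (d : List (String × Int)) (s : List String) :
    ∀ (rest : List String) (k : Nat), k < 60 → s.drop k = rest →
      ∀ (emb idx : List Int),
        pyA_loop d s rest k emb idx =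
          (emb ++ (pvSpecGo d rest (60 - k)).1, idx ++ (pvSpecGo d rest (60 - k)).2) := by
  intro rest
  induction rest with
  | nil =>
    intro k hk _ emb idx
    rw [pyA_loop, pyA_pad_spec d (60 - k) k rfl, pvSpecGo_nil]
  | cons w ws ih =>
    intro k hk hdrop emb idx
    have hlen : s.length - k = ws.length + 1 := by
      have h := congrArg List.length hdrop; simp at h; omega
    have hks : k < s.length := by omega
    have hget : PySem.List.pyGet? s ((k : Int) + 1) = ws[0]? := by
      have h1 : ((k : Int) + 1) = ((k + 1 : Nat) : Int) := by push_cast; ring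
      rw [h1, PySem.List.pyGet?_natCast]
      have h2 : (List.drop k s)[1]? = s[k + 1]? := List.getElem?_drop
      rw [hdrop] at h2
      simpa using h2.symm
    have hcond : ((k : Int) + 1 < (s.length : Int)) ↔ ws ≠ [] := by
      cases ws with
      | nil => simp at hlen ⊢; omega
      | cons a b => simp only [ne_eq, List.cons_ne_nil, not_false_iff, iff_true]; simp at hlen ⊢; omega
    rw [pyA_loop]
    have hfuel : 60 - k = (60 - (k + 1)) + 1 := by omega
    by_cases hk60 : k + 1 = 60
    · simp only [hk60, if_pos]
      rw [hfuel]
      cases ws with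
      | nil =>
        simp only [pvSpecGo, pvLkp]
        have : ¬ ((k : Int) + 1 < (s.length : Int)) := by rw [hcond]; simp
        simp [this, hk60, pvSpecGo]
      | cons w2 ws2 =>
        have hc : ((k : Int) + 1 < (s.length : Int)) := hcond.mpr (by simp)
        simp only [pvSpecGo, pvLkp, hk60]
        simp [hc, hget]
    · simp only [if_neg hk60]
      have hdrop' : s.drop (k + 1) = ws := by
        have : s.drop (k + 1) = (s.drop k).drop 1 := by
          rw [List.drop_drop]
        rw [this, hdrop]; rfl
      rw [ih (k + 1) (by omega) hdrop']
      rw [hfuel]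
      cases ws with
      | nil =>
        have : ¬ ((k : Int) + 1 < (s.length : Int)) := by rw [hcond]; simp
        simp [pvSpecGo, pvLkp, this, pvSpecGo_nil]
      | cons w2 ws2 =>
        have hc : ((k : Int) + 1 < (s.length : Int)) := hcond.mpr (by simp)
        simp [pvSpecGo, pvLkp, hc, hget]

theorem pvSpecGo_shape (d : List (String × Int)) :
    ∀ (rest : List String) (f : Nat),
      pvSpecGo d rest f =
        ( (rest.take f).map (pvLkp d) ++ List.replicate (f - rest.length) (pvPadv d),
          (if 1 ≤ f ∧ rest.length ≤ f ∧ rest ≠ [] then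
              ((rest.drop 1).take f).map (pvLkp d) ++ [pvLkp d "<pad>"]
            else ((rest.drop 1).take f).map (pvLkp d)) ++
            List.replicate (f - rest.length) (pvPadv d) ) := by
  intro rest
  induction rest with
  | nil => intro f; rw [pvSpecGo_nil]; simp
  | cons w ws ih =>
    intro f
    cases f with
    | zero => simp [pvSpecGo]
    | succ g =>
      simp only [pvSpecGo]
      rw [ih g]
      cases ws with
      | nil =>
        simp
      | cons w2 ws2 =>
        simp only [Prod.mk.injEq]
        constructor
        · simp [Nat.succ_sub_succ]
        · simp only [List.drop_one, List.tail_cons]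
          by_cases hle : ws2.length + 1 ≤ g
          · have h1g : 1 ≤ g := by omega
            rw [if_pos (by exact ⟨by omega, by simp only [List.length_cons]; omega, by simp⟩),
                if_pos (by exact ⟨by omega, by simp only [List.length_cons]; omega, by simp⟩)]
            rw [List.take_of_length_le (by omega),
                List.take_of_length_le (by simp only [List.length_cons]; omega)]
            simp [pvLkp]
          · rw [if_neg (by simp; omega)]
            by_cases hg : 1 ≤ g
            · rw [if_neg (by simp; omega)]
              have ht : (w2 :: ws2).take (g + 1) = w2 :: ws2.take g := by simp [List.take_succ_cons]
              simp [ht, show g - (ws2.length + 1) = 0 by omega, pvLkp]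
            · have hg0 : g = 0 := by omega
              subst hg0
              simp [pvLkp]

theorem sentence_data_alt_eq (s : List String) (d : List (String × Int)) :
    sentence_data_alt s d = pvSpecGo d s 60 := by
  rw [pvSpecGo_shape]
  unfold sentence_data_alt
  rw [PySem.List.slice_toNat s (a := 0) (b := 60) (by norm_num) (by norm_num),
      PySem.List.slice_toNat s (a := 1) (b := 61) (by norm_num) (by norm_num)]
  have hfun : (fun w => (pvDget d w).getD (pvUnk d)) = pvLkp d := rfl
  simp only [hfun, List.drop_zero, show (0 : Int).toNat = 0 from rfl,
    show (60 : Int).toNat = 60 from rfl, show (1 : Int).toNat = 1 from rfl,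
    show (61 : Int).toNat = 61 from rfl, show (61 : Nat) - 1 = 60 from rfl,
    List.length_map, List.length_take, List.length_drop]
  by_cases hnil : s = []
  · subst hnil; simp
  · have hne : 1 ≤ s.length := by
      cases s with | nil => exact absurd rfl hnil | cons a b => simp
    have hCiff : (1 ≤ 60 ∧ s.length ≤ 60 ∧ s ≠ []) = (s.length ≤ 60) := by
      apply propext
      exact ⟨fun ⟨_, h, _⟩ => h, fun h => ⟨by norm_num, h, hnil⟩⟩
    simp only [hCiff]
    split_ifs with hA hB hC
    all_goals try (exfalso; omega)
    · simp [pvLkp, show 60 - s.length = 0 by omega]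
    · simp [show 60 - s.length = 0 by omega]
    · rw [Nat.min_eq_right (by omega : s.length ≤ 60)]
      simp [pvLkp]

-- ===== VERDICT (by name: the statement is the Claim_ definition above) =====
theorem sentence_data_spec : Claim_equal_sentence_data := by
  intro s d _ _
  unfold Spec_sentence_data sentence_data
  rw [sentence_data_alt_eq]
  have := pyA_loop_spec d s s 0 (by norm_num) (by simp) [] []
  simpa using this
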